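-- pv_equiv track=rewrite | github.com/Vman384/Leetcode | medium/Amazon question 2.py | numIdleDrives
-- ===== SOURCE A (Python) =====
-- def numIdleDrives(x, y):
--     from collections import defaultdict
--
--     # Maps to store rows and columns
--     x_map = defaultdict(set)
--     y_map = defaultdict(set)
--
--     n = len(x)
--
--     # Populate x_map and y_map
--     for i in range(n):
--         x_map[x[i]].add(y[i])
--         y_map[y[i]].add(x[i])
--
--     idle_count = 0
--
--     # Check each robot
--     for i in range(n):
--         # Check if there's any other robot in the same row or column
--         has_neighbor_in_row = len(x_map[x[i]]) > 1
--         has_neighbor_in_col = len(y_map[y[i]]) > 1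
--
--         if has_neighbor_in_row or has_neighbor_in_col:
--             idle_count += 1
--
--     return idle_count
-- ===== SOURCE B (Python) =====
-- def numIdleDrives(x, y):
--     n = len(x)
--     idle = 0
--     for i in range(n):
--         if any((x[j] == x[i]) != (y[j] == y[i]) for j in range(n)):
--             idle += 1
--     return idle
-- ===== Notes on version B (the rewrite author's own statement) =====
-- stated objective: alternative
-- what changed: Replaces A's two defaultdict-of-sets index maps with a direct pairwise scan: drive i is idle iff some drive j matches it in exactly one coordinate (xor test), so no dictionaries or sets are built at all.
import Mathlib
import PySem

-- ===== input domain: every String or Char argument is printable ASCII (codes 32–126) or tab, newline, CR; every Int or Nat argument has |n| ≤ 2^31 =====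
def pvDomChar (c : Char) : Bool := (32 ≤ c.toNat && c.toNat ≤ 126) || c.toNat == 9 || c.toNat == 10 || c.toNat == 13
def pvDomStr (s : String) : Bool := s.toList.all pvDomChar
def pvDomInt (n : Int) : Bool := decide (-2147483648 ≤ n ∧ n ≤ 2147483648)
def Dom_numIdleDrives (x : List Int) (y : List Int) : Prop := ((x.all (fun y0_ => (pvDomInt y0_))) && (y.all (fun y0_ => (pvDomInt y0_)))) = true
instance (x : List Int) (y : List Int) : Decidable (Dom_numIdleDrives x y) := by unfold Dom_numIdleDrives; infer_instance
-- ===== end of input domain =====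

-- B drops A's dict-of-sets indexes entirely and tests each drive directly against
-- every other drive with a one-coordinate-match (xor) test (alternative: O(n^2),
-- index-free, vs A's O(n) map building).

-- ===== PORT A =====
-- Literal port of A: two defaultdict(set) maps built over range(n), then a
-- counting loop.  pyGetD is used for x[i]/y[i]; Pre_ keeps the indices in
-- range, exactly where Python's x[i]/y[i] return.
def numIdleDrives (x : List Int) (y : List Int) : Int :=
  let n : Int := PySem.List.len x
  let maps :=
    (PySem.List.pyRange 0 n).foldl
      (fun (m : PySem.Dict Int (PySem.Set Int) × PySem.Dict Int (PySem.Set Int)) i =>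
        let xi := PySem.List.pyGetD x i 0
        let yi := PySem.List.pyGetD y i 0
        (m.1.insert xi (PySem.Set.add (m.1.getD xi PySem.Set.empty) yi),
         m.2.insert yi (PySem.Set.add (m.2.getD yi PySem.Set.empty) xi)))
      (PySem.Dict.empty, PySem.Dict.empty)
  (PySem.List.pyRange 0 n).foldl
    (fun acc i =>
      let xi := PySem.List.pyGetD x i 0
      let yi := PySem.List.pyGetD y i 0
      let hasRow : Prop := PySem.Set.len (maps.1.getD xi PySem.Set.empty) > 1
      let hasCol : Prop := PySem.Set.len (maps.2.getD yi PySem.Set.empty) > 1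
      if hasRow ∨ hasCol then acc + 1 else acc)
    0

-- ===== PORT B =====
-- Literal port of Source B: for each i, scan all j with the xor test
-- (x[j] == x[i]) != (y[j] == y[i]); count the i for which any j passes.
def numIdleDrives_alt (x : List Int) (y : List Int) : Int :=
  let n : Int := PySem.List.len x
  (PySem.List.pyRange 0 n).foldl
    (fun idle i =>
      if (PySem.List.pyRange 0 n).any
           (fun j => (PySem.List.pyGetD x j 0 == PySem.List.pyGetD x i 0)
                     != (PySem.List.pyGetD y j 0 == PySem.List.pyGetD y i 0))
      then idle + 1 else idle)
    0

-- ===== PRECONDITION & SPEC =====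
-- Pre_ excludes exactly the inputs where A raises IndexError (y shorter than x,
-- so y[i] is out of range); A returns on every input satisfying Pre_.
def Pre_numIdleDrives (x : List Int) (y : List Int) : Prop := x.length ≤ y.length
instance (x : List Int) (y : List Int) : Decidable (Pre_numIdleDrives x y) := by
  unfold Pre_numIdleDrives; infer_instance

def pvWitness_numIdleDrives : List Int × List Int := ([0, 0, 1], [0, 1, 5])

def Spec_numIdleDrives (x : List Int) (y : List Int) (out : Int) : Prop := out = numIdleDrives_alt x y
instance (x : List Int) (y : List Int) (out : Int) : Decidable (Spec_numIdleDrives x y out) := by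
  unfold Spec_numIdleDrives; infer_instance

-- ===== CLAIM (what is proved, stated in full; the proofs are below) =====
def Claim_equal_numIdleDrives : Prop := ∀ (x : List Int) (y : List Int), Dom_numIdleDrives x y → Pre_numIdleDrives x y → Spec_numIdleDrives x y (numIdleDrives x y)

-- ===== LEMMAS AND PROOFS =====

-- A's map-building step, on the (x[i], y[i]) pair.
def pvStepA (m : PySem.Dict Int (PySem.Set Int) × PySem.Dict Int (PySem.Set Int))
    (p : Int × Int) : PySem.Dict Int (PySem.Set Int) × PySem.Dict Int (PySem.Set Int) :=
  (m.1.insert p.1 (PySem.Set.add (m.1.getD p.1 PySem.Set.empty) p.2),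
   m.2.insert p.2 (PySem.Set.add (m.2.getD p.2 PySem.Set.empty) p.1))

-- a fold over range(len x) reading x[i], y[i] is a fold over zip x y
lemma pv_foldl_range_zip {β : Type} (x : List Int) : ∀ (y : List Int), x.length ≤ y.length →
    ∀ (f : β → Int × Int → β) (a : β),
    (List.range x.length).foldl (fun s i => f s (x.getD i 0, y.getD i 0)) a = (x.zip y).foldl f a := by
  induction x with
  | nil => intro y _ f a; simp
  | cons xh xt ih =>
    intro y h f a
    cases y with
    | nil => simp at h
    | cons yh yt =>
      simp only [List.length_cons]
      rw [List.range_succ_eq_map]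
      simp only [List.foldl_cons, List.foldl_map, List.getD_cons_zero, List.getD_cons_succ]
      exact ih yt (by simpa using h) f (f a (xh, yh))

-- same, for any: B's inner scan over range(n) is a scan over zip x y
lemma pv_any_range_zip (x : List Int) : ∀ (y : List Int), x.length ≤ y.length →
    ∀ (f : Int × Int → Bool),
    (List.range x.length).any (fun j => f (x.getD j 0, y.getD j 0)) = (x.zip y).any f := by
  induction x with
  | nil => intro y _ f; simp
  | cons xh xt ih =>
    intro y h f
    cases y with
    | nil => simp at h
    | cons yh yt =>
      simp only [List.length_cons]
      rw [List.range_succ_eq_map]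
      simp only [List.any_cons, List.any_map, Function.comp_def, List.getD_cons_zero,
        List.getD_cons_succ, List.zip_cons_cons]
      rw [ih yt (by simpa using h) f]

lemma pv_rowmap (pts : List (Int × Int)) :
    ∀ (m : PySem.Dict Int (PySem.Set Int) × PySem.Dict Int (PySem.Set Int)) (k : Int),
    ((pts.foldl pvStepA m).1).getD k PySem.Set.empty =
      PySem.Set.update (m.1.getD k PySem.Set.empty)
        ((pts.filter (fun p => p.1 == k)).map Prod.snd) := by
  induction pts with
  | nil => intro m k; simp [PySem.Set.update]
  | cons p t ih =>
    intro m k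
    simp only [List.foldl_cons, List.filter_cons]
    by_cases hk : p.1 = k
    · subst hk
      simp only [BEq.rfl, if_pos trivial, List.map_cons]
      rw [ih, pvStepA, PySem.Dict.getD_insert]
      simp [PySem.Set.update]
    · have : (p.1 == k) = false := by simp [hk]
      simp only [this, Bool.false_eq_true, if_false]
      rw [ih, pvStepA, PySem.Dict.getD_insert]
      simp [Ne.symm hk]

lemma pv_colmap (pts : List (Int × Int)) :
    ∀ (m : PySem.Dict Int (PySem.Set Int) × PySem.Dict Int (PySem.Set Int)) (k : Int),
    ((pts.foldl pvStepA m).2).getD k PySem.Set.empty =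
      PySem.Set.update (m.2.getD k PySem.Set.empty)
        ((pts.filter (fun p => p.2 == k)).map Prod.fst) := by
  induction pts with
  | nil => intro m k; simp [PySem.Set.update]
  | cons p t ih =>
    intro m k
    simp only [List.foldl_cons, List.filter_cons]
    by_cases hk : p.2 = k
    · subst hk
      simp only [BEq.rfl, if_pos trivial, List.map_cons]
      rw [ih, pvStepA, PySem.Dict.getD_insert]
      simp [PySem.Set.update]
    · have : (p.2 == k) = false := by simp [hk]
      simp only [this, Bool.false_eq_true, if_false]
      rw [ih, pvStepA, PySem.Dict.getD_insert]
      simp [Ne.symm hk]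

lemma pv_getD_empty (k : Int) :
    (PySem.Dict.empty : PySem.Dict Int (PySem.Set Int)).getD k PySem.Set.empty = PySem.Set.empty := rfl

lemma pv_update_empty {α : Type} [BEq α] (l : List α) :
    PySem.Set.update PySem.Set.empty l = PySem.Set.ofList l := rfl

lemma pv_len_ofList {α : Type} [BEq α] (l : List α) :
    (PySem.Set.ofList l : PySem.Set α).len = ((PySem.List.dedup l).length : Int) := by
  rw [PySem.List.dedup_eq_ofList]; simp [PySem.Set.len]

-- a deduped list containing v has more than one element iff some element differs from v
lemma pv_one_lt_dedup {α : Type} [BEq α] [LawfulBEq α] [DecidableEq α]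
    (L : List α) (v : α) (hv : v ∈ L) :
    1 < (PySem.List.dedup L).length ↔ ∃ b ∈ L, b ≠ v := by
  rw [← List.toFinset_card_of_nodup (PySem.List.nodup_dedup L), Finset.one_lt_card]
  simp only [List.mem_toFinset, PySem.List.mem_dedup]
  constructor
  · rintro ⟨a, ha, b, hb, hab⟩
    by_cases hav : a = v
    · exact ⟨b, hb, fun hbv => hab (by rw [hav, hbv])⟩
    · exact ⟨a, ha, hav⟩
  · rintro ⟨b, hb, hbv⟩
    exact ⟨b, hb, v, hv, hbv⟩

-- A's "row set or column set bigger than 1" test equals B's xor-partner test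
lemma pv_cond_iff (pts : List (Int × Int)) (xi yi : Int) (hp : (xi, yi) ∈ pts) :
    (1 < (PySem.List.dedup ((pts.filter (fun p => p.1 == xi)).map Prod.snd)).length
     ∨ 1 < (PySem.List.dedup ((pts.filter (fun p => p.2 == yi)).map Prod.fst)).length)
    ↔ (pts.any (fun p => ((p.1 == xi) != (p.2 == yi)))) = true := by
  have hvr : yi ∈ (pts.filter (fun p => p.1 == xi)).map Prod.snd := by
    exact List.mem_map.mpr ⟨(xi, yi), List.mem_filter.mpr ⟨hp, by simp⟩, rfl⟩
  have hvc : xi ∈ (pts.filter (fun p => p.2 == yi)).map Prod.fst := by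
    exact List.mem_map.mpr ⟨(xi, yi), List.mem_filter.mpr ⟨hp, by simp⟩, rfl⟩
  rw [pv_one_lt_dedup _ _ hvr, pv_one_lt_dedup _ _ hvc, List.any_eq_true]
  simp only [List.mem_map, List.mem_filter, beq_iff_eq, bne_iff_ne, ne_eq]
  constructor
  · rintro (⟨b, ⟨⟨px, py⟩, ⟨hmem, hfx⟩, rfl⟩, hbv⟩ | ⟨b, ⟨⟨px, py⟩, ⟨hmem, hfy⟩, rfl⟩, hbv⟩)
    · exact ⟨(px, py), hmem, by simp_all⟩
    · exact ⟨(px, py), hmem, by simp_all⟩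
  · rintro ⟨⟨px, py⟩, hmem, hne⟩
    by_cases hx : px = xi
    · left
      refine ⟨py, ⟨(px, py), ⟨hmem, by simp [hx]⟩, rfl⟩, ?_⟩
      intro hy; exact hne (by simp [hx, hy])
    · right
      have hy : py = yi := by
        by_contra hy
        exact hne (by simp [hx, hy])
      refine ⟨px, ⟨(px, py), ⟨hmem, by simp [hy]⟩, rfl⟩, hx⟩

-- ===== VERDICT (by name: the statement is the Claim_ definition above) =====
theorem numIdleDrives_spec : Claim_equal_numIdleDrives := by
  intro x y _ hpre
  have h : x.length ≤ y.length := hpre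
  unfold Spec_numIdleDrives numIdleDrives numIdleDrives_alt
  simp only [show PySem.List.len x = ((x.length : Nat) : Int) from rfl,
    PySem.List.pyRange_zero_natCast, List.foldl_map, List.any_map, Function.comp_def,
    PySem.List.pyGetD_natCast]
  have hmap := pv_foldl_range_zip x y h pvStepA (PySem.Dict.empty, PySem.Dict.empty)
  simp only [pvStepA] at hmap
  simp only [hmap, pv_rowmap, pv_colmap, pv_getD_empty, pv_update_empty, pv_len_ofList]
  apply PySem.List.foldl_congr_mem
  intro acc i hi
  have hix : i < x.length := List.mem_range.mp hi
  have hiy : i < y.length := lt_of_lt_of_le hix h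
  have hz : i < (x.zip y).length := by simp [List.length_zip]; omega
  have hp : (x.getD i 0, y.getD i 0) ∈ x.zip y := by
    have hg : (x.zip y)[i] = (x.getD i 0, y.getD i 0) := by
      simp [List.getElem_zip, List.getD_eq_getElem?_getD, hix, hiy]
    rw [← hg]; exact List.getElem_mem hz
  have hany := pv_any_range_zip x y h
      (fun p => (p.1 == x.getD i 0) != (p.2 == y.getD i 0))
  simp only [] at hany
  rw [hany]
  have hiff := pv_cond_iff (x.zip y) (x.getD i 0) (y.getD i 0) hp
  refine if_congr ?_ rfl rfl
  rw [← hiff]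
  constructor
  · rintro (h1 | h2)
    · left; exact_mod_cast h1
    · right; exact_mod_cast h2
  · rintro (h1 | h2)
    · left; exact_mod_cast h1
    · right; exact_mod_cast h2
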